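-- pv_equiv track=rewrite | github.com/alexanderjoossens/1010 | Board.py | get_all_filled_rows
-- ===== SOURCE A (Python) =====
-- def dimension(board):
--     """
--         Return the dimension of the given board.
--         - The function returns the number of rows (== number of columns) of
--           the given board.
--         ASSUMPTIONS
--         - The given board is a proper board.
--     """
--     return len(board)
--
-- def get_all_filled_rows(board):
--     """
--         Return all the rows on the given board that are completely filled.
--         - The function returns a list of the numbers in ascending order of
--           all the rows that are completely filled.
--         ASSUMPTIONS
--         - The given board is a proper board.
--         NOTE
--         - You are not allowed to use for statements in the body of this function.
--     """
--     if dimension(board) == 0: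
--         return []
--
--     filled_rows = []
--     col = 0
--     row = 0
--     while row < dimension(board):
--         while col < dimension(board) and row < dimension(board):
--             if board[col][row] is None:
--                 col = -1
--                 row += 1
--             col += 1
--         if col == dimension(board):
--             if row == dimension(board):
--                 return filled_rows
--             filled_rows += (row+1,)
--             row += 1
--             col = 0
--         if row == dimension(board):
--             return filled_rows
-- ===== SOURCE B (Python) =====
-- def get_all_filled_rows(board):
--     n = len(board)
--     holes = set()
--     for c in range(n):
--         for r in range(n):
--             if board[c][r] is None:
--                 holes.add(r)
--     return [r + 1 for r in range(n) if r not in holes]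
-- ===== Notes on version B (the rewrite author's own statement) =====
-- stated objective: simpler
-- what changed: Replaces A's manually-managed nested while loop with sentinel column resets and mid-loop returns by a plain sweep that records in a set the rows containing a hole, then emits the 1-based complement in ascending order.
-- outside the precondition, e.g. on get_all_filled_rows([[None, None], [None]]): A returns [], B raises IndexError
import Mathlib
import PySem

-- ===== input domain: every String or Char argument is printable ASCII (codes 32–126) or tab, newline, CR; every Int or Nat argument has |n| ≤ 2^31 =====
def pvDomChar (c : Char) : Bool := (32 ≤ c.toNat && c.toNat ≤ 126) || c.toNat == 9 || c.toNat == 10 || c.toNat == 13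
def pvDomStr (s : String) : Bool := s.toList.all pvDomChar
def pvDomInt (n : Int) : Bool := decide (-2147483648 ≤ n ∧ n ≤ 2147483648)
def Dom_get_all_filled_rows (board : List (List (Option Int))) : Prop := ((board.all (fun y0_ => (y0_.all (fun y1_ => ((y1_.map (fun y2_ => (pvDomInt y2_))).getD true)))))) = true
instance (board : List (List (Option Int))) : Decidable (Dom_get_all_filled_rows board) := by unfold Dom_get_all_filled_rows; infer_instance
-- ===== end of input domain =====

-- Header: B replaces A's sentinel-driven nested while loop by a hole-marking set sweep plus a complement pass (objective: simpler); equivalence is proved on proper boards (Pre_).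


-- ===== PORT A =====
-- board[col][row]: two chained Python index operations; none = IndexError (excluded by Pre_).
def pvCellA (board : List (List (Option Int))) (c r : Int) : Option (Option Int) :=
  (PySem.List.pyGet? board c).bind (fun l => PySem.List.pyGet? l r)

-- the inner `while col < dimension(board) and row < dimension(board)` loop; returns the (row, col) state at exit
def pvInnerA (board : List (List (Option Int))) (n : Int) (row col : Int) : Int × Int :=
  if col < n ∧ row < n then
    match pvCellA board col row with
    | some none => pvInnerA board n (row + 1) (-1 + 1)   -- col = -1; row += 1; then col += 1
    | some (some _) => pvInnerA board n row (col + 1)    -- col += 1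
    | none => (row, col)                                 -- IndexError in Python (outside Pre_)
  else (row, col)
termination_by ((n - row).toNat, (n - col).toNat)
decreasing_by
  · apply Prod.Lex.left; omega
  · apply Prod.Lex.right; omega

-- the outer `while row < dimension(board)` loop; fuel only makes the recursion total (Python's loop runs at most n+1 times)
def pvOuterA (board : List (List (Option Int))) (n : Int) : Nat → Int → Int → List Int → List Int
  | 0, _, _, filled => filled
  | Nat.succ fuel, row, col, filled =>
    if row < n then
      let s := pvInnerA board n row col
      let row := s.1
      let col := s.2
      if col = n then
        if row = n then filled
        else
          let filled := filled ++ [row + 1]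
          let row := row + 1
          let col : Int := 0
          if row = n then filled else pvOuterA board n fuel row col filled
      else
        if row = n then filled
        else pvOuterA board n fuel row col filled
    else filled   -- Python falls off the while and returns None; unreachable (the body always returns or loops)

def get_all_filled_rows (board : List (List (Option Int))) : List Int :=
  let n : Int := (board.length : Int)
  if n = 0 then [] else pvOuterA board n (board.length + 1) 0 0 []

-- ===== PORT B =====
def pvCellB (board : List (List (Option Int))) (c r : Int) : Option (Option Int) :=
  (PySem.List.pyGet? board c).bind (fun l => PySem.List.pyGet? l r)

def get_all_filled_rows_alt (board : List (List (Option Int))) : List Int :=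
  let n : Int := (board.length : Int)
  let holes : PySem.Set Int :=
    (PySem.List.pyRange 0 n 1).foldl (fun s c =>
      (PySem.List.pyRange 0 n 1).foldl (fun s r =>
        if pvCellB board c r = some none then PySem.Set.add s r else s) s)
      PySem.Set.empty
  ((PySem.List.pyRange 0 n 1).filter (fun r => !(PySem.Set.contains holes r))).map (fun r => r + 1)

-- ===== PRECONDITION & SPEC =====
-- Pre_ restricts to proper boards (every row at least as long as the board, as A's docstring assumes);
-- on ragged boards A's early per-row scan can accidentally return while B raises IndexError.
def Pre_get_all_filled_rows (board : List (List (Option Int))) : Prop :=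
  ∀ l ∈ board, board.length ≤ l.length
instance (board : List (List (Option Int))) : Decidable (Pre_get_all_filled_rows board) := by
  unfold Pre_get_all_filled_rows; infer_instance

def pvWitness_get_all_filled_rows : List (List (Option Int)) := [[some 1, none], [some 2, some 3]]

def Spec_get_all_filled_rows (board : List (List (Option Int))) (out : List Int) : Prop := out = get_all_filled_rows_alt board
instance (board : List (List (Option Int))) (out : List Int) : Decidable (Spec_get_all_filled_rows board out) := by unfold Spec_get_all_filled_rows; infer_instance

-- ===== CLAIM (what is proved, stated in full; the proofs are below) =====
def Claim_equal_get_all_filled_rows : Prop := ∀ (board : List (List (Option Int))), Dom_get_all_filled_rows board → Pre_get_all_filled_rows board → Spec_get_all_filled_rows board (get_all_filled_rows board)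


-- ===== LEMMAS AND PROOFS =====

-- A cell value seen from the proofs: board[c][r] with Nat indices, total form
def pvVal (board : List (List (Option Int))) (c r : Nat) : Option Int :=
  (board.getD c []).getD r none

-- 'row r has no hole from column c on'
def pvRowOKb (board : List (List (Option Int))) (r : Nat) : Bool :=
  (List.range board.length).all (fun c => (pvVal board c r).isSome)

-- first filled row ≥ r (board.length if none)
def pvFF (board : List (List (Option Int))) (r : Nat) : Nat :=
  if r < board.length then (if pvRowOKb board r then r else pvFF board (r + 1)) else board.length
termination_by board.length - r

-- the ascending 1-based list of filled rows ≥ r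
def pvGoodFrom (board : List (List (Option Int))) (r : Nat) : List Int :=
  if r < board.length then
    (if pvRowOKb board r then ((r : Int) + 1) :: pvGoodFrom board (r + 1) else pvGoodFrom board (r + 1))
  else []
termination_by board.length - r

theorem pvCellA_eq (board : List (List (Option Int))) (hP : Pre_get_all_filled_rows board)
    (c r : Nat) (hc : c < board.length) (hr : r < board.length) :
    pvCellA board (c : Int) (r : Int) = some (pvVal board c r) := by
  have h2 : r < (board[c]).length := lt_of_lt_of_le hr (hP _ (List.getElem_mem hc))
  simp [pvCellA, pvVal, hc, h2]

theorem pvInnerA_ok (board : List (List (Option Int))) (hP : Pre_get_all_filled_rows board)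
    (r c : Nat) (hr : r < board.length) (hc : c ≤ board.length)
    (hok : ∀ j, c ≤ j → j < board.length → (pvVal board j r).isSome) :
    pvInnerA board (board.length : Int) (r : Int) (c : Int) = ((r : Int), (board.length : Int)) := by
  obtain ⟨k, hk⟩ : ∃ k, board.length - c = k := ⟨_, rfl⟩
  induction k generalizing c with
  | zero =>
    have hc' : c = board.length := by omega
    subst hc'
    rw [pvInnerA]
    simp
  | succ k ih =>
    have hclt : c < board.length := by omega
    have hval := hok c le_rfl hclt
    rw [pvInnerA]
    rw [pvCellA_eq board hP c r hclt hr]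
    obtain ⟨v, hv⟩ := Option.isSome_iff_exists.mp hval
    rw [hv]
    have hg : ((c : Int) < (board.length : Int) ∧ (r : Int) < (board.length : Int)) := by
      constructor <;> exact_mod_cast ‹_›
    rw [if_pos hg]
    have hcast : ((c : Int) + 1) = ((c + 1 : Nat) : Int) := by push_cast; ring
    rw [hcast]
    exact ih (c + 1) hclt (fun j hj hjl => hok j (by omega) hjl) (by omega)

theorem pvInnerA_skip (board : List (List (Option Int))) (hP : Pre_get_all_filled_rows board)
    (r c : Nat) (hr : r < board.length) (hc : c ≤ board.length)
    (hbad : ∃ j, c ≤ j ∧ j < board.length ∧ pvVal board j r = none) :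
    pvInnerA board (board.length : Int) (r : Int) (c : Int)
      = pvInnerA board (board.length : Int) ((r : Int) + 1) 0 := by
  obtain ⟨k, hk⟩ : ∃ k, board.length - c = k := ⟨_, rfl⟩
  induction k generalizing c with
  | zero =>
    exact absurd hbad (by intro ⟨j, h1, h2, _⟩; omega)
  | succ k ih =>
    have hclt : c < board.length := by omega
    rw [pvInnerA]
    rw [pvCellA_eq board hP c r hclt hr]
    have hg : ((c : Int) < (board.length : Int) ∧ (r : Int) < (board.length : Int)) := by
      constructor <;> exact_mod_cast ‹_›
    rw [if_pos hg]
    cases hv : pvVal board c r with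
    | none => norm_num
    | some v =>
      obtain ⟨j, hj1, hj2, hj3⟩ := hbad
      have hjc : c ≠ j := by rintro rfl; rw [hv] at hj3; simp at hj3
      have hcast : ((c : Int) + 1) = ((c + 1 : Nat) : Int) := by push_cast; ring
      rw [hcast]
      exact ih (c + 1) (by omega) ⟨j, by omega, hj2, hj3⟩ (by omega)

theorem pvRowOKb_iff (board : List (List (Option Int))) (r : Nat) :
    pvRowOKb board r = true ↔ ∀ j, j < board.length → (pvVal board j r).isSome := by
  simp [pvRowOKb]

theorem pvFF_ge (board : List (List (Option Int))) (r : Nat) (h : r ≤ board.length) :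
    r ≤ pvFF board r := by
  induction r using pvFF.induct board with
  | case1 r hlt hok => rw [pvFF, if_pos hlt, if_pos hok]
  | case2 r hlt hok ih => rw [pvFF, if_pos hlt, if_neg hok]; have := ih (by omega); omega
  | case3 r hlt => rw [pvFF, if_neg hlt]; omega

theorem pvFF_le (board : List (List (Option Int))) (r : Nat) (h : r ≤ board.length) :
    pvFF board r ≤ board.length := by
  induction r using pvFF.induct board with
  | case1 r hlt hok => rw [pvFF, if_pos hlt, if_pos hok]; omega
  | case2 r hlt hok ih => rw [pvFF, if_pos hlt, if_neg hok]; exact ih (by omega)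
  | case3 r hlt => rw [pvFF, if_neg hlt]

theorem pvFF_ok (board : List (List (Option Int))) (r : Nat) (h : pvFF board r < board.length) :
    pvRowOKb board (pvFF board r) = true := by
  induction r using pvFF.induct board with
  | case1 r hlt hok => rwa [pvFF, if_pos hlt, if_pos hok]
  | case2 r hlt hok ih =>
    rw [pvFF, if_pos hlt, if_neg hok] at h ⊢; exact ih h
  | case3 r hlt => rw [pvFF, if_neg hlt] at h; omega

theorem pvInnerA_exit (board : List (List (Option Int))) (hP : Pre_get_all_filled_rows board)
    (r : Nat) (hr : r ≤ board.length) :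
    pvInnerA board (board.length : Int) (r : Int) 0
      = (if pvFF board r < board.length
          then ((pvFF board r : Int), (board.length : Int))
          else ((board.length : Int), 0)) := by
  induction r using pvFF.induct board with
  | case1 r hlt hok =>
    rw [pvFF, if_pos hlt, if_pos hok, if_pos hlt]
    have := pvInnerA_ok board hP r 0 hlt (by omega)
      (fun j _ hjl => (pvRowOKb_iff board r).mp hok j hjl)
    simpa using this
  | case2 r hlt hok ih =>
    have hbad : ∃ j, 0 ≤ j ∧ j < board.length ∧ pvVal board j r = none := by
      by_contra hno
      push Not at hno
      exact hok ((pvRowOKb_iff board r).mpr (fun j hjl => by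
        cases hv : pvVal board j r with
        | none => exact absurd hv (hno j (Nat.zero_le j) hjl)
        | some v => simp))
    have hskip := pvInnerA_skip board hP r 0 hlt (by omega) hbad
    norm_num at hskip
    have hcast : ((r : Int) + 1) = ((r + 1 : Nat) : Int) := by push_cast; ring
    have hffeq : pvFF board r = pvFF board (r + 1) := by
      conv_lhs => rw [pvFF]
      rw [if_pos hlt, if_neg hok]
    rw [hskip, hcast, ih (by omega), hffeq]
  | case3 r hlt =>
    have hr' : r = board.length := by omega
    subst hr'
    rw [pvInnerA]
    simp [pvFF]

theorem pvGoodFrom_none (board : List (List (Option Int))) (r : Nat)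
    (h : pvFF board r = board.length) : pvGoodFrom board r = [] := by
  induction r using pvFF.induct board with
  | case1 r hlt hok => rw [pvFF, if_pos hlt, if_pos hok] at h; omega
  | case2 r hlt hok ih =>
    rw [pvFF, if_pos hlt, if_neg hok] at h
    rw [pvGoodFrom, if_pos hlt, if_neg hok]
    exact ih h
  | case3 r hlt => rw [pvGoodFrom, if_neg hlt]

theorem pvGoodFrom_ff (board : List (List (Option Int))) (r : Nat) (h : pvFF board r < board.length) :
    pvGoodFrom board r = ((pvFF board r : Int) + 1) :: pvGoodFrom board (pvFF board r + 1) := by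
  induction r using pvFF.induct board with
  | case1 r hlt hok =>
    rw [pvFF, if_pos hlt, if_pos hok] at h ⊢
    rw [pvGoodFrom, if_pos hlt, if_pos hok]
  | case2 r hlt hok ih =>
    rw [pvFF, if_pos hlt, if_neg hok] at h ⊢
    rw [pvGoodFrom, if_pos hlt, if_neg hok]
    exact ih h
  | case3 r hlt => rw [pvFF, if_neg hlt] at h; omega

theorem pvOuterA_eq (board : List (List (Option Int))) (hP : Pre_get_all_filled_rows board)
    (fuel : Nat) (r : Nat) (filled : List Int) (hr : r ≤ board.length)
    (hfuel : board.length - r < fuel) :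
    pvOuterA board (board.length : Int) fuel (r : Int) 0 filled = filled ++ pvGoodFrom board r := by
  induction fuel generalizing r filled with
  | zero => omega
  | succ fuel ih =>
    by_cases hrl : r < board.length
    · rw [pvOuterA]
      rw [if_pos (by exact_mod_cast hrl)]
      rw [pvInnerA_exit board hP r hr]
      by_cases hff : pvFF board r < board.length
      · rw [if_pos hff]
        simp only [if_true]
        rw [if_neg (show ¬ ((pvFF board r : Int) = (board.length : Int)) by
          exact_mod_cast Nat.ne_of_lt hff)]
        rw [pvGoodFrom_ff board r hff]
        by_cases hlast : pvFF board r + 1 = board.length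
        · rw [if_pos (show ((pvFF board r : Int) + 1 = (board.length : Int)) by
            exact_mod_cast hlast)]
          rw [pvGoodFrom_none board _ (by
            rw [hlast, pvFF, if_neg (lt_irrefl _)])]
        · rw [if_neg (show ¬ ((pvFF board r : Int) + 1 = (board.length : Int)) by
            intro hcontra
            exact hlast (by exact_mod_cast hcontra))]
          have hcast : ((pvFF board r : Int) + 1) = ((pvFF board r + 1 : Nat) : Int) := by
            push_cast; ring
          rw [hcast, ih (pvFF board r + 1) (filled ++ [((pvFF board r + 1 : Nat) : Int)])
            (by omega) (by have := pvFF_ge board r (by omega); omega)]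
          push_cast
          simp
      · rw [if_neg hff]
        have hlen0 : ¬ ((0 : Int) = (board.length : Int)) := by
          have h1 : 0 < board.length := by omega
          omega
        rw [if_neg hlen0]
        simp only [if_true]
        have hffeq : pvFF board r = board.length := by
          have := pvFF_le board r hr; omega
        rw [pvGoodFrom_none board r hffeq]
        simp
    · have hr' : r = board.length := by omega
      subst hr'
      rw [pvOuterA]
      rw [if_neg (by omega)]
      rw [pvGoodFrom, if_neg (lt_irrefl _)]
      simp

theorem portA_eq (board : List (List (Option Int))) (hP : Pre_get_all_filled_rows board) :
    get_all_filled_rows board = pvGoodFrom board 0 := by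
  unfold get_all_filled_rows
  by_cases h0 : board.length = 0
  · rw [if_pos (by exact_mod_cast h0)]
    rw [pvGoodFrom, if_neg (by omega)]
  · rw [if_neg (by exact_mod_cast h0)]
    have := pvOuterA_eq board hP (board.length + 1) 0 [] (Nat.zero_le _) (by omega)
    simpa using this

theorem pvGoodFrom_filter (board : List (List (Option Int))) (r : Nat) (h : r ≤ board.length) :
    pvGoodFrom board r
      = ((List.range' r (board.length - r)).filter (fun k => pvRowOKb board k)).map
          (fun k => (k : Int) + 1) := by
  induction r using pvGoodFrom.induct board with
  | case1 r hlt hok ih =>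
    rw [pvGoodFrom, if_pos hlt, if_pos hok]
    have hsub : board.length - r = (board.length - (r + 1)) + 1 := by omega
    rw [hsub, List.range'_succ]
    simp [hok, ih (by omega)]
  | case2 r hlt hok ih =>
    rw [pvGoodFrom, if_pos hlt, if_neg hok]
    have hsub : board.length - r = (board.length - (r + 1)) + 1 := by omega
    rw [hsub, List.range'_succ]
    simp only [List.filter_cons]
    rw [if_neg (by simp [hok])]
    exact ih (by omega)
  | case3 r hlt =>
    rw [pvGoodFrom, if_neg hlt]
    have hsub : board.length - r = 0 := by omega
    simp [hsub]

theorem mem_foldl_addIf (g : Int → Prop) [DecidablePred g] (rs : List Int) (s : List Int) (y : Int) :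
    (y ∈ rs.foldl (fun s r => if g r then PySem.Set.add s r else s) s) ↔
      y ∈ s ∨ (y ∈ rs ∧ g y) := by
  induction rs generalizing s with
  | nil => simp
  | cons r rs ih =>
    simp only [List.foldl_cons, ih, List.mem_cons]
    by_cases hg : g r
    · rw [if_pos hg]
      simp only [PySem.Set.mem_add]
      constructor
      · rintro ((h | rfl) | h)
        · exact Or.inl h
        · exact Or.inr ⟨Or.inl rfl, hg⟩
        · exact Or.inr ⟨Or.inr h.1, h.2⟩
      · rintro (h | ⟨(rfl | h), hgy⟩)
        · exact Or.inl (Or.inl h)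
        · exact Or.inl (Or.inr rfl)
        · exact Or.inr ⟨h, hgy⟩
    · rw [if_neg hg]
      constructor
      · rintro (h | h)
        · exact Or.inl h
        · exact Or.inr ⟨Or.inr h.1, h.2⟩
      · rintro (h | ⟨(rfl | h), hgy⟩)
        · exact Or.inl h
        · exact absurd hgy hg
        · exact Or.inr ⟨h, hgy⟩

theorem mem_foldl_addIf2 (g : Int → Int → Prop) [∀ c r, Decidable (g c r)]
    (cs rs : List Int) (s : List Int) (y : Int) :
    (y ∈ cs.foldl (fun s c => rs.foldl (fun s r => if g c r then PySem.Set.add s r else s) s) s) ↔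
      y ∈ s ∨ ∃ c ∈ cs, y ∈ rs ∧ g c y := by
  induction cs generalizing s with
  | nil => simp
  | cons c cs ih =>
    simp only [List.foldl_cons, ih, mem_foldl_addIf, List.mem_cons]
    constructor
    · rintro ((h | h) | ⟨c', hc', h⟩)
      · exact Or.inl h
      · exact Or.inr ⟨c, Or.inl rfl, h⟩
      · exact Or.inr ⟨c', Or.inr hc', h⟩
    · rintro (h | ⟨c', (rfl | hc'), h⟩)
      · exact Or.inl (Or.inl h)
      · exact Or.inl (Or.inr h)
      · exact Or.inr ⟨c', hc', h⟩

theorem portB_eq (board : List (List (Option Int))) (hP : Pre_get_all_filled_rows board) :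
    get_all_filled_rows_alt board
      = ((List.range board.length).filter (fun k => pvRowOKb board k)).map (fun k => (k : Int) + 1) := by
  unfold get_all_filled_rows_alt
  simp only [PySem.List.pyRange_zero_nat]
  set holes := ((List.range board.length).map (fun k : Nat => (k : Int))).foldl
      (fun s c => ((List.range board.length).map (fun k : Nat => (k : Int))).foldl
        (fun s r => if pvCellB board c r = some none then PySem.Set.add s r else s) s)
      PySem.Set.empty with hholes
  rw [List.filter_map, List.map_map]
  have hmem : ∀ k : Nat, k < board.length →
      (((k : Int) ∈ holes) ↔ ∃ cn, cn < board.length ∧ pvVal board cn k = none) := by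
    intro k hk
    rw [hholes]
    rw [mem_foldl_addIf2 (fun c r => pvCellB board c r = some none)]
    constructor
    · rintro (h | ⟨c, hc, _hkmem, hcell⟩)
      · exact absurd h (List.not_mem_nil)
      · obtain ⟨cn, hcn, rfl⟩ := by
          simpa using hc
        refine ⟨cn, hcn, ?_⟩
        have := pvCellA_eq board hP cn k hcn hk
        rw [show pvCellB = pvCellA from rfl, this] at hcell
        exact Option.some.inj hcell
    · rintro ⟨cn, hcn, hnone⟩
      refine Or.inr ⟨(cn : Int), ?_, ?_, ?_⟩
      · exact List.mem_map.mpr ⟨cn, List.mem_range.mpr hcn, rfl⟩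
      · exact List.mem_map.mpr ⟨k, List.mem_range.mpr hk, rfl⟩
      · rw [show pvCellB = pvCellA from rfl, pvCellA_eq board hP cn k hcn hk, hnone]
  have hfilter : ∀ k ∈ List.range board.length,
      ((fun r => !(PySem.Set.contains holes r)) ∘ (fun k : Nat => (k : Int))) k
        = pvRowOKb board k := by
    intro k hk
    have hk' : k < board.length := List.mem_range.mp hk
    have hcont : (PySem.Set.contains holes (k : Int) = true) ↔ ¬ (pvRowOKb board k = true) := by
      rw [PySem.Set.contains_iff, hmem k hk', pvRowOKb_iff]
      constructor
      · rintro ⟨cn, hcn, hnone⟩ hall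
        have := hall cn hcn
        rw [hnone] at this
        simp at this
      · intro hnot
        by_contra hno
        push Not at hno
        refine hnot (fun j hj => ?_)
        cases hv : pvVal board j k with
        | none => exact absurd hv (hno j hj)
        | some v => simp
    cases hok : pvRowOKb board k with
    | false =>
      have hmemk : ((k : Int)) ∈ holes := (PySem.Set.contains_iff holes _).mp
        (hcont.mpr (by simp [hok]))
      simp [hmemk]
    | true =>
      have : ¬ (PySem.Set.contains holes (k : Int) = true) := fun h => (hcont.mp h) hok
      simp [Bool.not_eq_true] at this
      simp [this]
  rw [List.filter_congr hfilter]
  simp only [Function.comp_def]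
  generalize (List.filter (fun k => pvRowOKb board k) (List.range board.length)) = l
  induction l with
  | nil => rfl
  | cons a l ih => simpa using ih

-- ===== VERDICT (by name: the statement is the Claim_ definition above) =====
theorem get_all_filled_rows_spec : Claim_equal_get_all_filled_rows := by
  intro board _hDom hP
  unfold Spec_get_all_filled_rows
  rw [portA_eq board hP, portB_eq board hP, pvGoodFrom_filter board 0 (Nat.zero_le _)]
  simp [List.range_eq_range']
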